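-- pv_equiv track=rewrite | github.com/rdilimas/python-tranning-dio | desafio Power BI - Analisando dados de um Dashboard de Vendas no Power BI/Dominando_Filtragem_e_Extração_de_Dados_com_Python/desafio_filtragem_de_visuais.py | filtrar_visuais
-- ===== SOURCE A (Python) =====
-- def filtrar_visuais(lista_visuais):
--     # Converter a string de entrada em uma lista
--     visuais = lista_visuais.split(", ")
--
--     # TODO: Normalize e remova duplicatas usando um conjunto
--     #Removendo duplicados transformando a lista em conjunto
--     for ind ,item in enumerate(visuais):
--         visuais[ind] = item.title()
--
--     conjunto_visuais = set(visuais)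
--
--     # TODO: Converta o conjunto de volta para uma lista ordenada:
--     lista_final = []
--     lista_final = list(conjunto_visuais)
--     lista_final.sort()
--
--     # Unir a lista em uma string, separada por vírgulas
--     return ", ".join(lista_final)
-- ===== SOURCE B (Python) =====
-- def filtrar_visuais(lista_visuais):
--     # sort-then-adjacent-dedup instead of set-dedup-then-sort
--     itens = sorted(item.title() for item in lista_visuais.split(", "))
--     final = []
--     prev = None
--     for item in itens:
--         if item != prev:
--             final.append(item)
--             prev = item
--     return ", ".join(final)
-- ===== Notes on version B (the rewrite author's own statement) =====
-- stated objective: alternative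
-- what changed: B replaces A's set-based dedup followed by sorting the deduplicated list with sorting the full titled list first and removing adjacent duplicates in a single scan with a prev accumulator.
import Mathlib
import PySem

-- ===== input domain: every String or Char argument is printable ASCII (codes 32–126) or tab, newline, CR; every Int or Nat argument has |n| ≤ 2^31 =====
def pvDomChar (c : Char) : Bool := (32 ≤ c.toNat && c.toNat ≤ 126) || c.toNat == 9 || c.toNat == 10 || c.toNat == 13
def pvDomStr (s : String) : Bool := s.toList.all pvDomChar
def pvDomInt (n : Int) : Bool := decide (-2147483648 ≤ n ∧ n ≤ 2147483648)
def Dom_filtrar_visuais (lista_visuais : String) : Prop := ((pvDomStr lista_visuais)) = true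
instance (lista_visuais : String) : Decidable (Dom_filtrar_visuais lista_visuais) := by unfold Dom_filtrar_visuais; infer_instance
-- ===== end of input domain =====

-- B sorts the full titled list and removes adjacent duplicates in one scan, instead of
-- A's set-dedup-then-sort; same cost, different structure (objective: alternative).

-- shared helper: Python str.title(), exact on the ASCII domain (cased chars = a-zA-Z there):
-- an alpha char is uppercased after a non-alpha char and lowercased after an alpha char.
def pyTitleAux : Bool → List Char → List Char
  | _, [] => []
  | prev, c :: t =>
    if PySem.Chars.isalpha c then
      (if prev then PySem.Chars.lowerChar c else PySem.Chars.upperChar c) :: pyTitleAux true t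
    else
      c :: pyTitleAux false t

def pyTitle (s : String) : String := String.ofList (pyTitleAux false s.toList)

-- ===== PORT A =====
def filtrar_visuais (lista_visuais : String) : String :=
  -- visuais = lista_visuais.split(", "); for ind, item in enumerate(visuais): visuais[ind] = item.title()
  let visuais := ((PySem.Str.split? lista_visuais ", ").getD []).map pyTitle
  -- conjunto_visuais = set(visuais)
  let conjunto_visuais := PySem.Set.ofList visuais
  -- lista_final = list(conjunto_visuais); lista_final.sort()
  let lista_final := PySem.List.sorted conjunto_visuais (fun x => x) false
  PySem.Str.join ", " lista_final

-- ===== PORT B =====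
-- B's loop body: if item != prev: final.append(item); prev = item
def pvStep (st : List String × Option String) (item : String) : List String × Option String :=
  if some item ≠ st.2 then (st.1 ++ [item], some item) else st

def filtrar_visuais_alt (lista_visuais : String) : String :=
  let itens := PySem.List.sorted (((PySem.Str.split? lista_visuais ", ").getD []).map pyTitle)
                 (fun x => x) false
  -- final = []; prev = None; for item in itens: if item != prev: final.append(item); prev = item
  let st := itens.foldl pvStep ([], none)
  PySem.Str.join ", " st.1

-- ===== PRECONDITION & SPEC =====
def Spec_filtrar_visuais (lista_visuais : String) (out : String) : Prop := out = filtrar_visuais_alt lista_visuais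
instance (lista_visuais : String) (out : String) : Decidable (Spec_filtrar_visuais lista_visuais out) := by unfold Spec_filtrar_visuais; infer_instance

-- ===== CLAIM (what is proved, stated in full; the proofs are below) =====
def Claim_equal_filtrar_visuais : Prop := ∀ (lista_visuais : String), Dom_filtrar_visuais lista_visuais → Spec_filtrar_visuais lista_visuais (filtrar_visuais lista_visuais)

-- ===== LEMMAS AND PROOFS =====

-- recursive characterisation of B's adjacent-dedup loop
def dedupFrom : Option String → List String → List String
  | _, [] => []
  | prev, x :: t => if some x ≠ prev then x :: dedupFrom (some x) t else dedupFrom prev t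

theorem foldl_dedup_eq (l : List String) :
    ∀ (res : List String) (prev : Option String),
      (l.foldl pvStep (res, prev)).1 = res ++ dedupFrom prev l := by
  induction l with
  | nil => intro res prev; simp [dedupFrom]
  | cons x t ih =>
    intro res prev
    rw [List.foldl_cons]
    by_cases h : some x = prev
    · have h1 : pvStep (res, prev) x = (res, prev) := by simp [pvStep, h]
      have h2 : dedupFrom prev (x :: t) = dedupFrom prev t := by simp [dedupFrom, h]
      rw [h1, h2, ih]
    · have h1 : pvStep (res, prev) x = (res ++ [x], some x) := by simp [pvStep, h]
      have h2 : dedupFrom prev (x :: t) = x :: dedupFrom (some x) t := by simp [dedupFrom, h]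
      rw [h1, h2, ih, List.append_assoc]
      rfl

theorem dedupFrom_props (l : List String) :
    ∀ (p : Option String), l.Pairwise (· ≤ ·) → (∀ q, p = some q → ∀ x ∈ l, q ≤ x) →
      (dedupFrom p l).Pairwise (· < ·) ∧ ∀ a, a ∈ dedupFrom p l ↔ a ∈ l ∧ some a ≠ p := by
  induction l with
  | nil => intro p _ _; simp [dedupFrom]
  | cons x t ih =>
    intro p hpw hlb
    have hxle : ∀ y ∈ t, x ≤ y := (List.pairwise_cons.mp hpw).1
    have hpwt : t.Pairwise (· ≤ ·) := (List.pairwise_cons.mp hpw).2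
    by_cases h : some x = p
    · -- x equals prev: it is skipped, prev unchanged
      have hrec := ih p hpwt (fun q hq y hy => hlb q hq y (List.mem_cons_of_mem _ hy))
      have hstep : dedupFrom p (x :: t) = dedupFrom p t := by
        simp [dedupFrom, h]
      rw [hstep]
      refine ⟨hrec.1, fun a => ?_⟩
      rw [hrec.2 a, List.mem_cons]
      constructor
      · rintro ⟨ha, hne⟩; exact ⟨Or.inr ha, hne⟩
      · rintro ⟨ha | ha, hne⟩
        · exact absurd (ha ▸ h) hne
        · exact ⟨ha, hne⟩
    · -- x kept, prev becomes some x
      have hrec := ih (some x) hpwt (by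
        intro q hq y hy
        injection hq with hq; exact hq ▸ hxle y hy)
      have hxlt : ∀ y ∈ dedupFrom (some x) t, x < y := by
        intro y hy
        have hm := (hrec.2 y).mp hy
        refine lt_of_le_of_ne (hxle y hm.1) fun he => hm.2 (by rw [he])
      have hstep : dedupFrom p (x :: t) = x :: dedupFrom (some x) t := by
        simp [dedupFrom, h]
      rw [hstep]
      refine ⟨List.pairwise_cons.mpr ⟨hxlt, hrec.1⟩, fun a => ?_⟩
      rw [List.mem_cons, hrec.2 a, List.mem_cons]
      constructor
      · rintro (rfl | ⟨ha, hne⟩)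
        · exact ⟨Or.inl rfl, h⟩
        · refine ⟨Or.inr ha, fun he => ?_⟩
          rcases p with _ | q
          · simp at he
          · injection he with he
            have h1 : q ≤ x := hlb q rfl x List.mem_cons_self
            have h2 : x ≤ a := hxle a ha
            exact hne (by rw [le_antisymm h2 (he ▸ h1)])
      · rintro ⟨rfl | ha, hne⟩
        · exact Or.inl rfl
        · by_cases hax : a = x
          · exact Or.inl hax
          · exact Or.inr ⟨ha, by simpa using hax⟩

-- ===== VERDICT (by name: the statement is the Claim_ definition above) =====
theorem filtrar_visuais_spec : Claim_equal_filtrar_visuais := by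
  intro s _
  unfold Spec_filtrar_visuais filtrar_visuais filtrar_visuais_alt
  set ts := ((PySem.Str.split? s ", ").getD []).map pyTitle with hts
  set sl := PySem.List.sorted ts (fun x => x) false with hsl
  have hpw : sl.Pairwise (· ≤ ·) := by
    simpa using PySem.List.sorted_pairwise ts (fun x => x)
  have hprops := dedupFrom_props sl none hpw (by intro q hq; simp at hq)
  have hd : (sl.foldl pvStep ([], none)).1 = dedupFrom none sl := by
    simpa using foldl_dedup_eq sl [] none
  have hperm : (dedupFrom none sl).Perm (PySem.Set.ofList ts) := by
    rw [List.perm_ext_iff_of_nodup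
        (hprops.1.imp (fun h => ne_of_lt h))
        (PySem.Set.nodup_ofList ts)]
    intro a
    rw [hprops.2 a, PySem.Set.mem_ofList, PySem.List.mem_sorted]
    simp
  have hmain : PySem.List.sorted (PySem.Set.ofList ts) (fun x => x) false
      = dedupFrom none sl :=
    PySem.List.sorted_eq_of_perm_of_pairwise_lt (PySem.Set.ofList ts) (dedupFrom none sl) (fun x => x) hperm hprops.1
  simp only [hd, hmain]
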